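-- pv_equiv track=rewrite | github.com/uvsq22201644/l1-python | exercises/TD04_listes/carre_magique.py | estNormal
-- ===== SOURCE A (Python) =====
-- def estNormal(carre):
--     """ Retourne True si contient toutes les valeurs de 1 à n^2 où n est la taille
--         du carré, et False sinon """
--     liste=[]
--     for lignes in carre:
--         liste.extend(lignes)
--     taille=len(carre)
--     for entier in range(1,taille*taille+1):
--         if entier not in liste:
--             return False
--     return True
-- ===== SOURCE B (Python) =====
-- def estNormal(carre):
--     """ Retourne True si contient toutes les valeurs de 1 a n^2 ou n est la taille
--         du carre, et False sinon """
--     n = len(carre)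
--     cibles = set(range(1, n * n + 1))
--     trouves = set()
--     for ligne in carre:
--         for v in ligne:
--             if v in cibles:
--                 trouves.add(v)
--     return len(trouves) == n * n
-- ===== Notes on version B (the rewrite author's own statement) =====
-- stated objective: faster
-- what changed: One pass over the cells accumulating which targets 1..n^2 were hit in a set and comparing the count, instead of scanning the whole flattened list once per target.
import Mathlib
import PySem

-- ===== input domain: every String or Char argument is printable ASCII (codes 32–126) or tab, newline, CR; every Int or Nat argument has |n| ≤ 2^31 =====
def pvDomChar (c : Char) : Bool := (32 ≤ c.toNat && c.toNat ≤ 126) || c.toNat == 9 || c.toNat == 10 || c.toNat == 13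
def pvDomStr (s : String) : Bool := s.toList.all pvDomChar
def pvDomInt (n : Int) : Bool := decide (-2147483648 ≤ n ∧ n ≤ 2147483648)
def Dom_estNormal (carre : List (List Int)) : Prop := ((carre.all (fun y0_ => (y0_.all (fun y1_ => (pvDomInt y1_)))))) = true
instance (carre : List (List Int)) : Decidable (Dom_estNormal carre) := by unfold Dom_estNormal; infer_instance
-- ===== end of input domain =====

-- B replaces A's one-scan-of-the-flattened-list-per-target loop by a single pass over
-- the cells accumulating the set of targets hit, then compares the count (faster).

-- ===== PORT A =====
def estNormal (carre : List (List Int)) : Bool :=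
  let liste : List Int := carre.foldl (fun l lignes => l ++ lignes) []
  let taille : Int := carre.length
  -- 'for entier in range(...): if entier not in liste: return False' then 'return True'
  (PySem.List.pyRange 1 (taille * taille + 1) 1).all (fun entier => liste.contains entier)

-- ===== PORT B =====
def estNormal_alt (carre : List (List Int)) : Bool :=
  let n : Int := carre.length
  let cibles : PySem.Set Int := PySem.Set.ofList (PySem.List.pyRange 1 (n * n + 1) 1)
  let trouves : PySem.Set Int :=
    carre.foldl (fun tr ligne =>
      ligne.foldl (fun tr v =>
        if PySem.Set.contains cibles v then PySem.Set.add tr v else tr) tr)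
      PySem.Set.empty
  decide (PySem.Set.len trouves = n * n)

-- ===== PRECONDITION & SPEC =====
def Spec_estNormal (carre : List (List Int)) (out : Bool) : Prop := out = estNormal_alt carre
instance (carre : List (List Int)) (out : Bool) : Decidable (Spec_estNormal carre out) := by unfold Spec_estNormal; infer_instance

-- ===== CLAIM (what is proved, stated in full; the proofs are below) =====
def Claim_equal_estNormal : Prop := ∀ (carre : List (List Int)), Dom_estNormal carre → Spec_estNormal carre (estNormal carre)

-- ===== LEMMAS AND PROOFS =====

theorem foldl_append_eq (carre : List (List Int)) (init : List Int) :
    carre.foldl (fun l lignes => l ++ lignes) init = init ++ carre.flatten := by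
  induction carre generalizing init with
  | nil => simp
  | cons h t ih => simp [List.foldl, ih, List.append_assoc]

/-- Invariant for B's inner fold over one row. -/
theorem inner_fold_spec (cibles : PySem.Set Int) (ligne : List Int) (tr : List Int)
    (hnd : tr.Nodup) :
    (ligne.foldl (fun tr v =>
        if PySem.Set.contains cibles v then PySem.Set.add tr v else tr) tr).Nodup ∧
    ∀ x, x ∈ (ligne.foldl (fun tr v =>
        if PySem.Set.contains cibles v then PySem.Set.add tr v else tr) tr) ↔
      x ∈ tr ∨ (x ∈ ligne ∧ x ∈ cibles) := by
  induction ligne generalizing tr with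
  | nil => simp [hnd]
  | cons v rest ih =>
    rw [List.foldl_cons]
    by_cases hv : PySem.Set.contains cibles v = true
    · rw [if_pos hv]
      obtain ⟨h1, h2⟩ := ih (PySem.Set.add tr v) (PySem.Set.nodup_add tr v hnd)
      refine ⟨h1, fun x => ?_⟩
      rw [h2 x, PySem.Set.mem_add]
      have hvmem : v ∈ cibles := by simpa using hv
      simp only [List.mem_cons]
      constructor
      · rintro ((h | rfl) | ⟨h, hc⟩)
        · exact Or.inl h
        · exact Or.inr ⟨Or.inl rfl, hvmem⟩
        · exact Or.inr ⟨Or.inr h, hc⟩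
      · rintro (h | ⟨(rfl | h), hc⟩)
        · exact Or.inl (Or.inl h)
        · exact Or.inl (Or.inr rfl)
        · exact Or.inr ⟨h, hc⟩
    · rw [if_neg hv]
      obtain ⟨h1, h2⟩ := ih tr hnd
      refine ⟨h1, fun x => ?_⟩
      rw [h2 x]
      have hvnm : v ∉ cibles := by simpa using hv
      simp only [List.mem_cons]
      constructor
      · rintro (h | ⟨h, hc⟩)
        · exact Or.inl h
        · exact Or.inr ⟨Or.inr h, hc⟩
      · rintro (h | ⟨(rfl | h), hc⟩)
        · exact Or.inl h
        · exact absurd hc hvnm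
        · exact Or.inr ⟨h, hc⟩

/-- Invariant for B's outer fold. -/
theorem outer_fold_spec (cibles : PySem.Set Int) (carre : List (List Int)) (tr : List Int)
    (hnd : tr.Nodup) :
    (carre.foldl (fun tr ligne => ligne.foldl (fun tr v =>
        if PySem.Set.contains cibles v then PySem.Set.add tr v else tr) tr) tr).Nodup ∧
    ∀ x, x ∈ (carre.foldl (fun tr ligne => ligne.foldl (fun tr v =>
        if PySem.Set.contains cibles v then PySem.Set.add tr v else tr) tr) tr) ↔
      x ∈ tr ∨ (x ∈ carre.flatten ∧ x ∈ cibles) := by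
  induction carre generalizing tr with
  | nil => simp [hnd]
  | cons ligne rest ih =>
    obtain ⟨h1, h2⟩ := inner_fold_spec cibles ligne tr hnd
    obtain ⟨h3, h4⟩ := ih _ h1
    refine ⟨h3, fun x => ?_⟩
    rw [List.foldl_cons, h4 x, h2 x]
    simp only [List.flatten_cons, List.mem_append]
    tauto

theorem estNormal_spec_aux (carre : List (List Int)) :
    estNormal carre = estNormal_alt carre := by
  unfold estNormal estNormal_alt
  simp only [foldl_append_eq, List.nil_append]
  set n : Int := (carre.length : Int) with hn
  set R : List Int := PySem.List.pyRange 1 (n * n + 1) 1 with hR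
  set cibles : PySem.Set Int := PySem.Set.ofList R with hC
  obtain ⟨hnd, hmem⟩ := outer_fold_spec cibles carre PySem.Set.empty (by simp [PySem.Set.empty])
  set T : List Int := carre.foldl (fun tr ligne => ligne.foldl (fun tr v =>
        if PySem.Set.contains cibles v then PySem.Set.add tr v else tr) tr) PySem.Set.empty with hT
  have hmem' : ∀ x, x ∈ T ↔ x ∈ carre.flatten ∧ x ∈ R := by
    intro x
    rw [hmem x]
    simp [PySem.Set.empty, hC, PySem.Set.mem_ofList]
  have hRnd : R.Nodup := by rw [hR]; exact PySem.List.nodup_pyRange_one _ _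
  have hsub : T ⊆ R := fun x hx => ((hmem' x).mp hx).2
  have hTR : List.Subperm T R := List.subperm_of_subset hnd hsub
  have hRlen : (R.length : Int) = n * n := by
    rw [hR, PySem.List.length_pyRange_one]
    have : (0:Int) ≤ n * n := mul_self_nonneg n
    omega
  have hlen : PySem.Set.len T = T.length := by
    simp [PySem.Set.len]
  by_cases hall : ∀ x ∈ R, x ∈ carre.flatten
  · -- both true
    have hRT : R ⊆ T := fun x hx => (hmem' x).mpr ⟨hall x hx, hx⟩
    have hRTs : List.Subperm R T := List.subperm_of_subset hRnd hRT
    have hlene : T.length = R.length := le_antisymm hTR.length_le hRTs.length_le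
    have hA : (R.all (fun entier => (carre.flatten).contains entier)) = true := by
      simp only [List.all_eq_true]
      intro x hx
      simpa using hall x hx
    rw [hA, eq_comm, decide_eq_true_iff]
    omega
  · push Not at hall
    obtain ⟨x, hxR, hxf⟩ := hall
    have hA : (R.all (fun entier => (carre.flatten).contains entier)) = false := by
      simp only [List.all_eq_false]
      exact ⟨x, hxR, by simpa using hxf⟩
    rw [hA, eq_comm, decide_eq_false_iff_not]
    intro hlenEq
    have hlene : R.length ≤ T.length := by omega
    have hperm : List.Perm T R := hTR.perm_of_length_le hlene
    exact hxf ((hmem' x).mp (hperm.mem_iff.mpr hxR)).1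

-- ===== VERDICT (by name: the statement is the Claim_ definition above) =====
theorem estNormal_spec : Claim_equal_estNormal := by
  intro carre _
  exact estNormal_spec_aux carre
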